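-- pv_equiv track=rewrite | github.com/awais-124/ICPC | ICPC-2024-Solutions/PY.py | three_largest_primes_below
-- ===== SOURCE A (Python) =====
-- def three_largest_primes_below(n):
--     """Get sum of three largest primes below n"""
--     def is_prime(x):
--         if x < 2:
--             return False
--         for i in range(2, int(x**0.5) + 1):
--             if x % i == 0:
--                 return False
--         return True
--
--     primes = []
--     for i in range(n - 1, 1, -1):
--         if is_prime(i):
--             primes.append(i)
--             if len(primes) == 3:
--                 break
--
--     return sum(primes) if len(primes) >= 3 else sum(primes)
-- ===== SOURCE B (Python) =====
-- def three_largest_primes_below(n):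
--     """Get sum of three largest primes below n"""
--     if n <= 2:
--         return 0
--     limit = int((n - 1) ** 0.5)
--     base = [True] * (limit + 1)
--     base[0] = False
--     base[1] = False
--     for i in range(2, limit + 1):
--         for j in range(2 * i, limit + 1, i):
--             base[j] = False
--     base_primes = [i for i in range(2, limit + 1) if base[i]]
--     total = 0
--     count = 0
--     hi = n
--     while hi > 2 and count < 3:
--         lo = max(2, hi - 65536)
--         seg = [True] * (hi - lo)
--         for p in base_primes:
--             start = max(p * p, ((lo + p - 1) // p) * p)
--             for j in range(start, hi, p):
--                 seg[j - lo] = False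
--         for v in range(hi - 1, lo - 1, -1):
--             if seg[v - lo]:
--                 total += v
--                 count += 1
--                 if count == 3:
--                     break
--         hi = lo
--     return total
-- ===== Notes on version B (the rewrite author's own statement) =====
-- stated objective: alternative
-- what changed: Replaces per-number sqrt-bounded trial division collecting a list of up to three primes with a segmented sieve: a base sieve up to sqrt(n-1) built by marking multiples, then fixed 65536-wide windows below n sieved by the base primes and scanned top-down accumulating sum and count.
import Mathlib
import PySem

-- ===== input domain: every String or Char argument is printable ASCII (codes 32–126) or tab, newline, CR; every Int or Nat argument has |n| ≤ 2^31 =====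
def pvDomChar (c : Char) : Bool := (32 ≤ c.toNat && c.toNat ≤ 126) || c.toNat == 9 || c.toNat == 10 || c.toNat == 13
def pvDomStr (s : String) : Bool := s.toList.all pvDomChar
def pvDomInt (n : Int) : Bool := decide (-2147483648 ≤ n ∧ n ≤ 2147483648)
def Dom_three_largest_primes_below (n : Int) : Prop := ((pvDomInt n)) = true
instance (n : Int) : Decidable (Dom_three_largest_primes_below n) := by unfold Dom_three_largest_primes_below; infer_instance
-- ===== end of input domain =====

-- B replaces per-number trial division by a segmented sieve (base sieve to sqrt, fixed windows walked top-down); same values, no speed claim.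

-- ===== PORT A =====
-- is_prime: trial division by 2..int(x**0.5); int(x**0.5) = Nat.sqrt exactly for 0 ≤ x ≤ 2^31
-- (the double sqrt is correctly rounded, and below 2^31 that rounding never crosses an integer).
def pvIsPrime (x : Int) : Bool :=
  if x < 2 then false
  else (PySem.List.pyRange 2 ((Nat.sqrt x.toNat : Int) + 1) 1).all
         (fun i => !(PySem.Int.mod x i == 0))

-- the for-loop over the LAZY range(n-1, 1, -1) with append and break at len == 3,
-- as the countdown recursion it iterates (Python's range never materialises; neither does this)
def pvALoop (i : Int) (primes : List Int) : List Int :=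
  if h : 1 < i then
    (if pvIsPrime i then
      let primes' := primes ++ [i]
      if primes'.length == 3 then primes' else pvALoop (i - 1) primes'
    else pvALoop (i - 1) primes)
  else primes
termination_by (i - 1).toNat
decreasing_by all_goals omega

def three_largest_primes_below (n : Int) : Int :=
  let primes := pvALoop (n - 1) []
  if primes.length ≥ 3 then primes.sum else primes.sum

-- ===== PORT B =====
-- base-sieve marking: for i in range(2, L): for j in range(2*i, L, i): base[j] = False
-- (a Python list of booleans under index assignment = Array Bool; every index written is in
--  [0, L) = the array's size, so the in-bounds write setIfInBounds is exact; called with L = limit+1)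
def pvMark (L : Int) (s : Array Bool) : Array Bool :=
  (PySem.List.pyRange 2 L 1).foldl
    (fun s i => (PySem.List.pyRange (2 * i) L i).foldl (fun s j => s.setIfInBounds j.toNat false) s) s

-- window marking: for p in base_primes: for j in range(max(p*p, ((lo+p-1)//p)*p), hi, p): seg[j-lo] = False
def pvSegMark (lo hi : Int) (bp : List Int) (s : Array Bool) : Array Bool :=
  bp.foldl (fun s p =>
    (PySem.List.pyRange (max (p * p) (PySem.Int.floordiv (lo + p - 1) p * p)) hi p).foldl
      (fun s j => s.setIfInBounds (j - lo).toNat false) s) s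

-- the per-window top-down scan: for v in range(hi-1, lo-1, -1), break at count == 3
def pvScan (sieve : Array Bool) (lo : Int) : List Int → Int → Int → Int × Int
  | [], total, count => (total, count)
  | v :: rest, total, count =>
    if sieve.getD (v - lo).toNat false then
      let total' := total + v
      let count' := count + 1
      if count' == 3 then (total', count') else pvScan sieve lo rest total' count'
    else pvScan sieve lo rest total count

-- the while loop: while hi > 2 and count < 3: sieve the window [lo, hi), scan it, hi = lo
def pvSegLoop (bp : List Int) (hi total count : Int) : Int :=
  if h : 2 < hi ∧ count < 3 then
    let lo := max 2 (hi - 65536)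
    let seg := pvSegMark lo hi bp (Array.replicate (hi - lo).toNat true)
    match pvScan seg lo (PySem.List.pyRange (hi - 1) (lo - 1) (-1)) total count with
    | (total', count') => pvSegLoop bp lo total' count'
  else total
termination_by hi.toNat
decreasing_by rcases max_choice 2 (hi - 65536) with h' | h' <;> simp only [h'] <;> omega

-- int((n-1)**0.5) = Nat.sqrt exactly for 0 ≤ n-1 ≤ 2^31 (same float argument as in port A)
def three_largest_primes_below_alt (n : Int) : Int :=
  if n ≤ 2 then 0
  else
    let limit : Int := (Nat.sqrt (n - 1).toNat : Int)
    let base := pvMark (limit + 1)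
      (((Array.replicate (limit + 1).toNat true).setIfInBounds 0 false).setIfInBounds 1 false)
    let bp := (PySem.List.pyRange 2 (limit + 1) 1).filter (fun i => base.getD i.toNat false)
    pvSegLoop bp n 0 0

-- ===== PRECONDITION & SPEC =====
def Spec_three_largest_primes_below (n : Int) (out : Int) : Prop := out = three_largest_primes_below_alt n
instance (n : Int) (out : Int) : Decidable (Spec_three_largest_primes_below n out) := by unfold Spec_three_largest_primes_below; infer_instance

-- ===== CLAIM (what is proved, stated in full; the proofs are below) =====
def Claim_equal_three_largest_primes_below : Prop := ∀ (n : Int), Dom_three_largest_primes_below n → Spec_three_largest_primes_below n (three_largest_primes_below n)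

-- ===== LEMMAS AND PROOFS =====

-- A's loop, re-read as a fold over the materialised countdown list (proof-side only)
def pvALoopL : List Int → List Int → List Int
  | [], primes => primes
  | i :: rest, primes =>
    if pvIsPrime i then
      let primes' := primes ++ [i]
      if primes'.length == 3 then primes' else pvALoopL rest primes'
    else pvALoopL rest primes

lemma pvALoop_eq_list (k : Nat) : ∀ (i : Int), (i - 1).toNat = k → ∀ primes,
    pvALoop i primes = pvALoopL (PySem.List.pyRange i 1 (-1)) primes := by
  induction k with
  | zero =>
    intro i hk primes
    rw [pvALoop, dif_neg (by omega : ¬ 1 < i),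
      PySem.List.pyRange_neg_one_eq_nil (by omega : i ≤ 1), pvALoopL]
  | succ k ih =>
    intro i hk primes
    rw [pvALoop, dif_pos (by omega : 1 < i),
      PySem.List.pyRange_neg_one_cons (by omega : 1 < i), pvALoopL]
    cases pvIsPrime i with
    | false => exact ih (i - 1) (by omega) primes
    | true =>
      simp only
      by_cases h3 : (primes ++ [i]).length == 3
      · rw [if_pos h3, if_pos h3]
        simp
      · rw [if_neg h3, if_neg h3]
        exact ih (i - 1) (by omega) (primes ++ [i])

-- one set-false write, read pointwise
lemma getD_set_false (s : List Bool) (m k : Nat) :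
    (s.set m false).getD k false = (s.getD k false && !(m == k)) := by
  simp only [List.getD_eq_getElem?_getD, List.getElem?_set]
  by_cases h : m = k
  · subst h
    by_cases hl : m < s.length
    · simp [hl]
    · simp [hl]
  · simp [h]

-- a whole pass of set-false writes through an index map g, read pointwise
lemma getD_foldl_set (g : Int → Nat) (l : List Int) (s : List Bool) (k : Nat) :
    (l.foldl (fun s j => s.set (g j) false) s).getD k false
      = (s.getD k false && !(l.any (fun j => g j == k))) := by
  induction l generalizing s with
  | nil => simp
  | cons j rest ih =>
    simp only [List.foldl_cons, ih, getD_set_false, List.any_cons]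
    cases s.getD k false <;> cases (g j == k) <;> simp

-- the nested marking fold, read pointwise (f abstracts the inner range, g the index map)
lemma getD_foldl_foldl_set (g : Int → Nat) (f : Int → List Int) (l : List Int) (s : List Bool) (k : Nat) :
    (l.foldl (fun s i => (f i).foldl (fun s j => s.set (g j) false) s) s).getD k false
      = (s.getD k false && !(l.any (fun i => (f i).any (fun j => g j == k)))) := by
  induction l generalizing s with
  | nil => simp
  | cons i rest ih =>
    simp only [List.foldl_cons, ih, getD_foldl_set, List.any_cons]
    cases s.getD k false <;> cases (f i).any (fun j => g j == k) <;> simp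

-- Array.getD reads through toList
lemma arr_getD_toList (a : Array Bool) (i : Nat) (d : Bool) : a.getD i d = a.toList.getD i d := by
  unfold Array.getD
  split
  · next h => rw [List.getD_eq_getElem?_getD, List.getElem?_eq_getElem (by simpa using h)]; simp
  · next h => rw [List.getD_eq_getElem?_getD, List.getElem?_eq_none (by simpa using h)]; rfl

-- one marking pass over the array, through toList
lemma toList_foldl_set (g : Int → Nat) (l : List Int) (a : Array Bool) :
    (l.foldl (fun a j => a.setIfInBounds (g j) false) a).toList
      = l.foldl (fun s j => s.set (g j) false) a.toList := by
  induction l generalizing a with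
  | nil => simp
  | cons j rest ih => simp [ih, Array.toList_setIfInBounds]

-- a nested marking, through toList
lemma toList_foldl_foldl (g : Int → Nat) (f : Int → List Int) (l : List Int) (a : Array Bool) :
    ((l.foldl (fun a i => (f i).foldl (fun a j => a.setIfInBounds (g j) false) a) a)).toList
      = l.foldl (fun s i => (f i).foldl (fun s j => s.set (g j) false) s) a.toList := by
  induction l generalizing a with
  | nil => simp
  | cons i rest ih => simp [ih, toList_foldl_set]

-- A's trial division decides Nat.Prime
lemma isPrime_eq_prime (x : Int) (hx : 0 ≤ x) :
    pvIsPrime x = decide (Nat.Prime x.toNat) := by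
  unfold pvIsPrime
  by_cases h2 : x < 2
  · have hnp : ¬ Nat.Prime x.toNat := by
      intro hp; have := hp.two_le; omega
    simp [h2, hnp]
  · rw [if_neg h2]
    have hxx : ((x.toNat : Int)) = x := Int.toNat_of_nonneg hx
    have key : ((PySem.List.pyRange 2 ((Nat.sqrt x.toNat : Int) + 1) 1).all
         (fun i => !(PySem.Int.mod x i == 0)) = true) ↔ Nat.Prime x.toNat := by
      rw [List.all_eq_true, Nat.prime_def_le_sqrt]
      constructor
      · intro h
        refine ⟨by omega, fun m hm hms hdvd => ?_⟩
        have hmem : (m : Int) ∈ PySem.List.pyRange 2 ((Nat.sqrt x.toNat : Int) + 1) 1 := by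
          rw [PySem.List.mem_pyRange_one]
          constructor
          · exact_mod_cast hm
          · omega
        have hthis := h _ hmem
        simp only [Bool.not_eq_eq_eq_not, Bool.not_true, beq_eq_false_iff_ne, ne_eq,
          PySem.Int.mod_eq_zero_iff_dvd] at hthis
        exact hthis (by rw [← hxx]; exact_mod_cast hdvd)
      · rintro ⟨-, h⟩ i hi
        rw [PySem.List.mem_pyRange_one] at hi
        have hdvd : ¬ (i ∣ x) := by
          intro hd
          have h1 : i.toNat ∣ x.toNat :=
            Int.natCast_dvd_natCast.mp
              (by rw [Int.toNat_of_nonneg (by omega : (0:ℤ) ≤ i), hxx]; exact hd)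
          exact h i.toNat (by omega) (by omega) h1
        simp only [Bool.not_eq_eq_eq_not, Bool.not_true, beq_eq_false_iff_ne, ne_eq,
          PySem.Int.mod_eq_zero_iff_dvd]
        exact hdvd
    rcases Bool.eq_false_or_eq_true ((PySem.List.pyRange 2 ((Nat.sqrt x.toNat : Int) + 1) 1).all
         (fun i => !(PySem.Int.mod x i == 0))) with hb | hb <;>
      rw [hb] <;> rw [hb] at key <;> simp at key <;> simp [key]

-- the base index i is marked by some pass iff i is composite
lemma mark_any_iff (n i : Int) (h2 : 2 ≤ i) (hi : i < n) :
    ((PySem.List.pyRange 2 n 1).any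
       (fun c => (PySem.List.pyRange (2 * c) n c).any (fun j => j.toNat == i.toNat)) = true)
      ↔ ¬ Nat.Prime i.toNat := by
  rw [List.any_eq_true]
  constructor
  · rintro ⟨c, hcmem, hcany⟩
    rw [PySem.List.mem_pyRange_one] at hcmem
    rw [List.any_eq_true] at hcany
    rcases hcany with ⟨j, hjmem, hji⟩
    rw [PySem.List.mem_pyRange_iff_of_pos (by omega : (0:ℤ) < c)] at hjmem
    have hji' : j = i := by
      have := beq_iff_eq.mp hji
      omega
    subst hji'
    have hcd : c ∣ j := by
      have := dvd_add hjmem.2.2 (dvd_mul_left c 2)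
      simpa using this
    intro hp
    have hcdn : c.toNat ∣ j.toNat :=
      Int.natCast_dvd_natCast.mp
        (by rw [Int.toNat_of_nonneg (by omega : (0:ℤ) ≤ c), Int.toNat_of_nonneg (by omega : (0:ℤ) ≤ j)]; exact hcd)
    rcases hp.eq_one_or_self_of_dvd c.toNat hcdn with h1 | h1 <;> omega
  · intro hnp
    rcases Nat.exists_dvd_of_not_prime2 (by omega) hnp with ⟨m, hmd, hm2, hmlt⟩
    have h2m : 2 * m ≤ i.toNat := by
      rcases hmd with ⟨t, ht⟩
      have ht2 : 2 ≤ t := by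
        rcases Nat.lt_or_ge t 2 with h | h
        · interval_cases t <;> omega
        · exact h
      calc 2 * m = m * 2 := by ring
        _ ≤ m * t := Nat.mul_le_mul_left m ht2
        _ = i.toNat := ht.symm
    refine ⟨(m : Int), ?_, ?_⟩
    · rw [PySem.List.mem_pyRange_one]; omega
    · rw [List.any_eq_true]
      refine ⟨i, ?_, by simp⟩
      rw [PySem.List.mem_pyRange_iff_of_pos (by omega : (0:ℤ) < (m:Int))]
      refine ⟨by omega, hi, ?_⟩
      have : (m : Int) ∣ i := by
        have := Int.natCast_dvd_natCast.mpr hmd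
        rwa [Int.toNat_of_nonneg (by omega : (0:ℤ) ≤ i)] at this
      exact dvd_sub this (dvd_mul_left (m : Int) 2)

-- the finished base sieve cell at a scanned index decides Nat.Prime
lemma sieve_getD (L i : Int) (hn : 2 < L) (h2 : 2 ≤ i) (hi : i < L) :
    (pvMark L (((Array.replicate L.toNat true).setIfInBounds 0 false).setIfInBounds 1 false)).getD i.toNat false
      = decide (Nat.Prime i.toNat) := by
  unfold pvMark
  rw [arr_getD_toList, toList_foldl_foldl Int.toNat,
    getD_foldl_foldl_set Int.toNat]
  have hinit : ((((Array.replicate L.toNat true).setIfInBounds 0 false).setIfInBounds 1 false).toList).getD i.toNat false = true := by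
    rw [Array.toList_setIfInBounds, Array.toList_setIfInBounds, Array.toList_replicate,
      getD_set_false, getD_set_false]
    have hk : i.toNat < L.toNat := by omega
    simp only [List.getD_eq_getElem?_getD, List.getElem?_replicate, hk, if_pos]
    have h0 : (0 == i.toNat) = false := by simp; omega
    have h1 : (1 == i.toNat) = false := by simp; omega
    simp [h0, h1]
  rw [hinit, Bool.true_and]
  have hiff := mark_any_iff L i h2 hi
  by_cases hp : Nat.Prime i.toNat
  · have hb : ((PySem.List.pyRange 2 L 1).any
        (fun c => (PySem.List.pyRange (2 * c) L c).any (fun j => j.toNat == i.toNat))) = false := by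
      rcases Bool.eq_false_or_eq_true ((PySem.List.pyRange 2 L 1).any
          (fun c => (PySem.List.pyRange (2 * c) L c).any (fun j => j.toNat == i.toNat))) with hb | hb
      · exact absurd (hiff.mp hb) (not_not.mpr hp)
      · exact hb
    rw [hb]
    simp [hp]
  · rw [hiff.mpr hp]
    simp [hp]

-- membership in the base-prime list
lemma mem_bp (limit p : Int)
    (base : Array Bool)
    (hbase : ∀ i : Int, 2 ≤ i → i < limit + 1 → base.getD i.toNat false = decide (Nat.Prime i.toNat)) :
    (p ∈ (PySem.List.pyRange 2 (limit + 1) 1).filter (fun i => base.getD i.toNat false))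
      ↔ (2 ≤ p ∧ p ≤ limit ∧ Nat.Prime p.toNat) := by
  rw [List.mem_filter, PySem.List.mem_pyRange_one]
  constructor
  · rintro ⟨⟨h1, h2⟩, hb⟩
    rw [hbase p h1 h2] at hb
    exact ⟨h1, by omega, by simpa using hb⟩
  · rintro ⟨h1, h2, hp⟩
    refine ⟨⟨h1, by omega⟩, ?_⟩
    rw [hbase p h1 (by omega)]
    simpa using hp

-- the window range for p hits v iff p divides v with p*p ≤ v
lemma seg_range_hit (lo hi p v : Int) (hp : 2 ≤ p) (hv : lo ≤ v) (hvh : v < hi) :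
    ((PySem.List.pyRange (max (p * p) (PySem.Int.floordiv (lo + p - 1) p * p)) hi p).any
        (fun j => (j - lo).toNat == (v - lo).toNat) = true)
      ↔ (p ∣ v ∧ p * p ≤ v) := by
  have hfd : PySem.Int.floordiv (lo + p - 1) p = (lo + p - 1) / p :=
    PySem.Int.floordiv_eq_ediv_of_pos (by omega)
  have hcd : p ∣ PySem.Int.floordiv (lo + p - 1) p * p := dvd_mul_left p _
  have hkey : lo ≤ PySem.Int.floordiv (lo + p - 1) p * p ∧
      PySem.Int.floordiv (lo + p - 1) p * p < lo + p := by
    have h1 := Int.emod_add_ediv (lo + p - 1) p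
    have h2 := Int.emod_nonneg (lo + p - 1) (by omega : p ≠ 0)
    have h3 := Int.emod_lt_of_pos (lo + p - 1) (by omega : 0 < p)
    have hcc : PySem.Int.floordiv (lo + p - 1) p * p = p * ((lo + p - 1) / p) := by
      rw [hfd, mul_comm]
    omega
  have hds : p ∣ max (p * p) (PySem.Int.floordiv (lo + p - 1) p * p) := by
    rcases max_choice (p * p) (PySem.Int.floordiv (lo + p - 1) p * p) with h | h <;> rw [h]
    · exact Dvd.intro p rfl
    · exact hcd
  rw [List.any_eq_true]
  constructor
  · rintro ⟨j, hjmem, hjeq⟩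
    rw [PySem.List.mem_pyRange_iff_of_pos (by omega : (0:ℤ) < p)] at hjmem
    have hstart_le : lo ≤ max (p * p) (PySem.Int.floordiv (lo + p - 1) p * p) :=
      le_trans hkey.1 (le_max_right _ _)
    have hjv : j = v := by
      have := beq_iff_eq.mp hjeq
      omega
    subst hjv
    refine ⟨?_, le_trans (le_max_left _ _) hjmem.1⟩
    have := dvd_add hjmem.2.2 hds
    simpa using this
  · rintro ⟨hdvd, hpp⟩
    refine ⟨v, ?_, by simp⟩
    rw [PySem.List.mem_pyRange_iff_of_pos (by omega : (0:ℤ) < p)]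
    have hcle : PySem.Int.floordiv (lo + p - 1) p * p ≤ v := by
      by_contra hcon
      push_neg at hcon
      have hd : p ∣ PySem.Int.floordiv (lo + p - 1) p * p - v := dvd_sub hcd hdvd
      have hpos : 0 < PySem.Int.floordiv (lo + p - 1) p * p - v := by omega
      have := Int.le_of_dvd hpos hd
      omega
    refine ⟨max_le hpp hcle, hvh, dvd_sub hdvd hds⟩

-- the finished window cell at a scanned value decides Nat.Prime
lemma seg_getD (n lo hi v : Int) (bp : List Int)
    (hbp : ∀ p : Int, p ∈ bp ↔ (2 ≤ p ∧ p ≤ (Nat.sqrt (n - 1).toNat : Int) ∧ Nat.Prime p.toNat))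
    (hlo : 2 ≤ lo) (hhi : hi ≤ n) (hv : lo ≤ v) (hvh : v < hi) :
    (pvSegMark lo hi bp (Array.replicate (hi - lo).toNat true)).getD (v - lo).toNat false
      = decide (Nat.Prime v.toNat) := by
  unfold pvSegMark
  rw [arr_getD_toList, toList_foldl_foldl (fun j => (j - lo).toNat),
    getD_foldl_foldl_set (fun j => (j - lo).toNat)]
  have hinit : ((Array.replicate (hi - lo).toNat true).toList).getD (v - lo).toNat false = true := by
    rw [Array.toList_replicate]
    have hk : (v - lo).toNat < (hi - lo).toNat := by omega
    simp [List.getD_eq_getElem?_getD, hk]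
  rw [hinit, Bool.true_and]
  have hchar : (bp.any (fun p =>
      (PySem.List.pyRange (max (p * p) (PySem.Int.floordiv (lo + p - 1) p * p)) hi p).any
        (fun j => (j - lo).toNat == (v - lo).toNat)) = true) ↔ ¬ Nat.Prime v.toNat := by
    rw [List.any_eq_true]
    constructor
    · rintro ⟨p, hpmem, hhit⟩
      rcases (hbp p).mp hpmem with ⟨hp2, hplim, hpprime⟩
      rcases (seg_range_hit lo hi p v hp2 hv hvh).mp hhit with ⟨hdvd, hpp⟩
      intro hvprime
      have hdn : p.toNat ∣ v.toNat :=
        Int.natCast_dvd_natCast.mp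
          (by rw [Int.toNat_of_nonneg (by omega : (0:ℤ) ≤ p), Int.toNat_of_nonneg (by omega : (0:ℤ) ≤ v)]; exact hdvd)
      have h2p : 2 * p ≤ p * p := mul_le_mul_of_nonneg_right hp2 (by omega)
      rcases hvprime.eq_one_or_self_of_dvd p.toNat hdn with h1 | h1 <;> omega
    · intro hnp
      have hv2 : 2 ≤ v.toNat := by omega
      have hne1 : v.toNat ≠ 1 := by omega
      have hpr := Nat.minFac_prime hne1
      have hdvd := Nat.minFac_dvd v.toNat
      have hsq : v.toNat.minFac * v.toNat.minFac ≤ v.toNat := by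
        have h := Nat.minFac_sq_le_self (n := v.toNat) (by omega) hnp
        rwa [pow_two] at h
      refine ⟨(v.toNat.minFac : Int), (hbp _).mpr ⟨by exact_mod_cast hpr.two_le, ?_, by simpa using hpr⟩, ?_⟩
      · have hle : v.toNat.minFac ≤ Nat.sqrt (n - 1).toNat := by
          rw [Nat.le_sqrt]
          exact le_trans hsq (by omega)
        exact_mod_cast hle
      · rw [seg_range_hit lo hi _ v (by exact_mod_cast hpr.two_le) hv hvh]
        constructor
        · have := Int.natCast_dvd_natCast.mpr hdvd
          rwa [Int.toNat_of_nonneg (by omega : (0:ℤ) ≤ v)] at this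
        · have : ((v.toNat.minFac * v.toNat.minFac : Nat) : Int) ≤ ((v.toNat : Nat) : Int) := by
            exact_mod_cast hsq
          push_cast at this
          omega
  by_cases hp : Nat.Prime v.toNat
  · have hb : (bp.any (fun p =>
        (PySem.List.pyRange (max (p * p) (PySem.Int.floordiv (lo + p - 1) p * p)) hi p).any
          (fun j => (j - lo).toNat == (v - lo).toNat))) = false := by
      rcases Bool.eq_false_or_eq_true (bp.any (fun p =>
          (PySem.List.pyRange (max (p * p) (PySem.Int.floordiv (lo + p - 1) p * p)) hi p).any
            (fun j => (j - lo).toNat == (v - lo).toNat))) with hb | hb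
      · exact absurd (hchar.mp hb) (not_not.mpr hp)
      · exact hb
    rw [hb]
    simp [hp]
  · rw [hchar.mpr hp]
    simp [hp]

-- the A-loop over a split list, given fewer than three primes collected so far
lemma pvALoopL_append (l1 l2 primes : List Int) (h : primes.length < 3) :
    pvALoopL (l1 ++ l2) primes
      = (if (pvALoopL l1 primes).length == 3 then pvALoopL l1 primes
         else pvALoopL l2 (pvALoopL l1 primes)) := by
  induction l1 generalizing primes with
  | nil =>
    rw [List.nil_append, pvALoopL]
    rw [if_neg (by simp; omega)]
  | cons i rest ih =>
    rw [List.cons_append, pvALoopL, pvALoopL]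
    cases pvIsPrime i with
    | false => exact ih primes h
    | true =>
      simp only
      by_cases h3 : ((primes ++ [i]).length == 3)
      · rw [if_pos h3, if_pos h3]
        simp at h3 ⊢
        intro hcon
        omega
      · rw [if_neg h3, if_neg h3]
        exact ih (primes ++ [i]) (by simp at h3 ⊢; omega)

-- the A-loop never collects more than three primes
lemma pvALoopL_len (l primes : List Int) (h : primes.length < 3) :
    (pvALoopL l primes).length ≤ 3 := by
  induction l generalizing primes with
  | nil => rw [pvALoopL]; omega
  | cons i rest ih =>
    rw [pvALoopL]
    cases pvIsPrime i with
    | false => exact ih primes h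
    | true =>
      simp only
      by_cases h3 : ((primes ++ [i]).length == 3)
      · rw [if_pos h3]; simp at h3 ⊢; omega
      · rw [if_neg h3]
        exact ih (primes ++ [i]) (by simp at h3 ⊢; omega)

-- the window scan agrees with the A-loop on the same values
lemma scan_eq (S : Array Bool) (lo : Int) (l : List Int)
    (hS : ∀ v ∈ l, S.getD (v - lo).toNat false = pvIsPrime v) :
    ∀ primes total count, total = primes.sum → count = (primes.length : Int) → primes.length < 3 →
      pvScan S lo l total count = ((pvALoopL l primes).sum, ((pvALoopL l primes).length : Int)) := by
  induction l with
  | nil => intro primes total count ht hc hlt; simp [pvScan, pvALoopL, ht, hc]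
  | cons i rest ih =>
    intro primes total count ht hc hlt
    have hhead := hS i (List.mem_cons_self)
    have htail : ∀ j ∈ rest, S.getD (j - lo).toNat false = pvIsPrime j :=
      fun j hj => hS j (List.mem_cons_of_mem i hj)
    rw [pvScan, pvALoopL, hhead]
    cases hp : pvIsPrime i with
    | false => exact ih htail primes total count ht hc hlt
    | true =>
      simp only
      have hlen : (primes ++ [i]).length = primes.length + 1 := by simp
      by_cases h3 : primes.length + 1 = 3
      · have hA : ((primes ++ [i]).length == 3) = true := by simp [hlen, h3]
        have hB : (count + 1 == 3) = true := by rw [beq_iff_eq]; omega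
        rw [hA, hB]
        simp [ht, hc, h3]
        all_goals omega
      · have hA : ((primes ++ [i]).length == 3) = false := by simp [hlen]; omega
        have hB : (count + 1 == 3) = false := by rw [beq_eq_false_iff_ne]; omega
        rw [hA, hB]
        simp only [Bool.false_eq_true, if_false]
        exact ih htail (primes ++ [i]) (total + i) (count + 1) (by simp [ht]) (by simp [hc]) (by omega)

-- the segmented while-loop agrees with the A-loop over the whole countdown
lemma seg_loop_eq (n : Int) (hn : 2 < n) (bp : List Int)
    (hbp : ∀ p : Int, p ∈ bp ↔ (2 ≤ p ∧ p ≤ (Nat.sqrt (n - 1).toNat : Int) ∧ Nat.Prime p.toNat)) :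
    ∀ (k : Nat) (hi : Int), hi.toNat = k → hi ≤ n →
      ∀ primes total count, total = primes.sum → count = (primes.length : Int) → primes.length < 3 →
        pvSegLoop bp hi total count = (pvALoopL (PySem.List.pyRange (hi - 1) 1 (-1)) primes).sum := by
  intro k
  induction k using Nat.strong_induction_on with
  | _ k ih =>
    intro hi hk hhin primes total count ht hc hlt
    rw [pvSegLoop]
    by_cases h2hi : 2 < hi
    · rw [dif_pos ⟨h2hi, by omega⟩]
      simp only []
      set M := max 2 (hi - 65536) with hM
      have hlo2 : (2:ℤ) ≤ M := le_max_left _ _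
      have hlolt : M < hi := by
        rcases max_choice 2 (hi - 65536) with h | h <;> rw [← hM] at h <;> omega
      have hS : ∀ v ∈ PySem.List.pyRange (hi - 1) (M - 1) (-1),
          (pvSegMark M hi bp (Array.replicate (hi - M).toNat true)).getD (v - M).toNat false
            = pvIsPrime v := by
        intro v hv
        rw [PySem.List.mem_pyRange_neg_one] at hv
        rw [seg_getD n M hi v bp hbp hlo2 hhin (by omega) (by omega),
          isPrime_eq_prime v (by omega)]
      rw [scan_eq _ _ _ hS primes total count ht hc hlt]
      have hsplit : PySem.List.pyRange (hi - 1) 1 (-1)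
          = PySem.List.pyRange (hi - 1) (M - 1) (-1) ++ PySem.List.pyRange (M - 1) 1 (-1) := by
        rw [PySem.List.pyRange_neg_one_eq_reverse, PySem.List.pyRange_neg_one_eq_reverse,
          PySem.List.pyRange_neg_one_eq_reverse, ← List.reverse_append]
        have e1 : M - 1 + 1 = M := by ring
        have e2 : (1:ℤ) + 1 = 2 := by norm_num
        have e3 : hi - 1 + 1 = hi := by ring
        rw [e1, e2, e3, ← PySem.List.pyRange_one_append 2 M hi hlo2 (le_of_lt hlolt)]
      rw [hsplit, pvALoopL_append _ _ _ hlt]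
      simp only []
      set r1 := pvALoopL (PySem.List.pyRange (hi - 1) (M - 1) (-1)) primes with hr1
      by_cases h3 : r1.length = 3
      · rw [if_pos (by simp [h3])]
        rw [pvSegLoop, dif_neg (fun hcon => absurd hcon.2 (by omega))]
      · rw [if_neg (by simp [h3])]
        have hlen3 : r1.length < 3 := lt_of_le_of_ne (pvALoopL_len _ _ hlt) h3
        exact ih M.toNat (by omega) M rfl (by omega) r1 r1.sum (r1.length : Int) rfl rfl hlen3
    · rw [dif_neg (by omega)]
      rw [PySem.List.pyRange_neg_one_eq_nil (by omega : hi - 1 ≤ 1), pvALoopL]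
      exact ht

-- ===== VERDICT (by name: the statement is the Claim_ definition above) =====
theorem three_largest_primes_below_spec : Claim_equal_three_largest_primes_below := by
  intro n _
  unfold Spec_three_largest_primes_below three_largest_primes_below three_largest_primes_below_alt
  rw [pvALoop_eq_list (n - 1 - 1).toNat (n - 1) rfl []]
  by_cases hn : n ≤ 2
  · rw [if_pos hn, PySem.List.pyRange_neg_one_eq_nil (by omega : n - 1 ≤ 1)]
    simp [pvALoopL]
  · rw [if_neg hn]
    rw [ite_self]
    exact (seg_loop_eq n (by omega) _
      (fun p => mem_bp _ p _
        (fun i h2 hilt => sieve_getD _ i (by omega) h2 hilt))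
      n.toNat n rfl le_rfl [] 0 0 (by simp) (by simp) (by simp)).symm
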